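-- pv_equiv track=rewrite | github.com/grizzzB/DPR | dpr/data/create_kor_dataset.py | split_passage
-- ===== SOURCE A (Python) =====
-- def split_passage(passage: str, max_len: int =120, min_len: int = 10):
--     # whitespace 기준으로 길이 측정
--     tokens = passage.split(" ")
--     sub_passg = []
--     offset_list = [0]
--     for i in range(0, len(tokens), max_len):
--         sub_passg.append(tokens[i:i+max_len])
--         char_passg = offset_list[-1] + len(" ".join(sub_passg[-1]))
--         offset_list.append(char_passg)
--
--     return sub_passg, offset_list
-- ===== SOURCE B (Python) =====
-- def split_passage(passage: str, max_len: int = 120, min_len: int = 10):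
--     # Build-then-accumulate: chunks as slices; offsets from a prefix-sum table of
--     # token lengths (a joined chunk of k tokens has sum(lens)+k-1 chars).
--     tokens = passage.split(" ")
--     n = len(tokens)
--     if max_len <= 0:
--         return [], [0]
--     cum = [0]
--     s = 0
--     for t in tokens:
--         s += len(t)
--         cum.append(s)
--     nchunks = (n + max_len - 1) // max_len
--     sub_passg = [tokens[j * max_len:(j + 1) * max_len] for j in range(nchunks)]
--     offset_list = [0] + [cum[min(j * max_len, n)] + min(j * max_len, n) - j
--                          for j in range(1, nchunks + 1)]
--     return sub_passg, offset_list
-- ===== Notes on version B (the rewrite author's own statement) =====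
-- stated objective: alternative
-- what changed: A fuses slicing and offset computation into one loop whose offset update space-joins each chunk again; B is a build-then-accumulate decomposition: a prefix-sum table of token lengths built once, chunks as independent slices, and each offset in closed form (chunk char sum + chunk size - 1) read off the table.
import Mathlib
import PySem

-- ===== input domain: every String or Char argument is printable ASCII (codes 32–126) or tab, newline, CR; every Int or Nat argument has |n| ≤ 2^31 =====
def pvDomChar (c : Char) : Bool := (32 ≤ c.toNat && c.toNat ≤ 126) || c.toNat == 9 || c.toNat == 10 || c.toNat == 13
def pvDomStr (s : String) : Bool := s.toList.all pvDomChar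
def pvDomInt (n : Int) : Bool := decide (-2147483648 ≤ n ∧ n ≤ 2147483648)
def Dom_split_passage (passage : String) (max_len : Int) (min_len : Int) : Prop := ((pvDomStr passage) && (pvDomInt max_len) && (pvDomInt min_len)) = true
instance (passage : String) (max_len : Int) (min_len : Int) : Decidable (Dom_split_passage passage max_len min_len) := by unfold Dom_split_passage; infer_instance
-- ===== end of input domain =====

-- B replaces A's fused loop (running space-join length sum) by a build-then-accumulate
-- decomposition: a prefix-sum table of token lengths, chunk slices, closed-form offsets
-- (objective: alternative; same asymptotic cost).


-- ===== PORT A =====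
def split_passage (passage : String) (max_len : Int) (min_len : Int) : List (List String) × List Int :=
  let tokens := (PySem.Str.split? passage " ").getD []
  (PySem.List.pyRange 0 (PySem.List.len tokens) max_len).foldl
    (fun (st : List (List String) × List Int) i =>
      let sub_passg := st.1 ++ [PySem.List.slice tokens (some i) (some (i + max_len))]
      let char_passg := PySem.List.pyGetD st.2 (-1) 0
        + PySem.Str.len (PySem.Str.join " " (PySem.List.pyGetD sub_passg (-1) []))
      (sub_passg, st.2 ++ [char_passg]))
    ([], [0])

-- ===== PORT B =====
def split_passage_alt (passage : String) (max_len : Int) (min_len : Int) : List (List String) × List Int :=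
  let tokens := (PySem.Str.split? passage " ").getD []
  let n : Int := PySem.List.len tokens
  if max_len ≤ 0 then ([], [0]) else
  let cum := (tokens.foldl
      (fun (p : List Int × Int) t =>
        (p.1 ++ [p.2 + PySem.Str.len t], p.2 + PySem.Str.len t)) ([0], 0)).1
  let nchunks := PySem.Int.floordiv (n + max_len - 1) max_len
  let sub_passg := (PySem.List.pyRange 0 nchunks 1).map
      (fun j => PySem.List.slice tokens (some (j * max_len)) (some ((j + 1) * max_len)))
  let offset_list := 0 :: (PySem.List.pyRange 1 (nchunks + 1) 1).map
      (fun j => PySem.List.pyGetD cum (min (j * max_len) n) 0 + min (j * max_len) n - j)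
  (sub_passg, offset_list)

-- ===== PRECONDITION & SPEC =====
-- Pre_ excludes only max_len = 0, where Python A raises ValueError (range() step 0).
def Pre_split_passage (passage : String) (max_len : Int) (min_len : Int) : Prop := max_len ≠ 0
instance (passage : String) (max_len : Int) (min_len : Int) : Decidable (Pre_split_passage passage max_len min_len) := by unfold Pre_split_passage; infer_instance
def pvWitness_split_passage : String × Int × Int := ("a b c", 2, 10)

def Spec_split_passage (passage : String) (max_len : Int) (min_len : Int) (out : List (List String) × List Int) : Prop := out = split_passage_alt passage max_len min_len
instance (passage : String) (max_len : Int) (min_len : Int) (out : List (List String) × List Int) : Decidable (Spec_split_passage passage max_len min_len out) := by unfold Spec_split_passage; infer_instance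

-- ===== CLAIM (what is proved, stated in full; the proofs are below) =====
def Claim_equal_split_passage : Prop := ∀ (passage : String) (max_len : Int) (min_len : Int), Dom_split_passage passage max_len min_len → Pre_split_passage passage max_len min_len → Spec_split_passage passage max_len min_len (split_passage passage max_len min_len)

-- ===== LEMMAS AND PROOFS =====

-- prefix sum of token lengths (proof-side characterisation of B's `cum` table)
def pvCumf (t : List String) (e : Nat) : Int := ((t.take e).map PySem.Str.len).sum
-- the k-th chunk of size m
def pvChunk (t : List String) (m k : Nat) : List String := (t.drop (k * m)).take m
-- closed-form offset after j chunks
def pvOff (t : List String) (m j : Nat) : Int :=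
  pvCumf t (min (j * m) t.length) + (min (j * m) t.length : Int) - j

lemma pv_join_len_chars (sep p : List Char) : ∀ (rest : List (List Char)),
    (PySem.Chars.join sep (p :: rest)).length
      = p.length + ((rest.map List.length).sum + rest.length * sep.length) := by
  intro rest
  induction rest generalizing p with
  | nil => simp [PySem.Chars.join_singleton]
  | cons q r ih =>
      rw [PySem.Chars.join_cons_cons]
      simp [ih q]; ring

lemma pv_join_len (p : String) (rest : List String) :
    PySem.Str.len (PySem.Str.join " " (p :: rest))
      = PySem.Str.len p + ((rest.map PySem.Str.len).sum + rest.length) := by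
  rw [PySem.Str.len_eq, PySem.Str.toList_join]
  simp [pv_join_len_chars, PySem.Str.len_eq]
  push_cast
  induction rest with
  | nil => simp
  | cons q r ih => simp [PySem.Str.len_eq] at *; push_cast; omega


lemma pv_cum_spec (t : List String) : ∀ (acc : List Int) (s : Int),
    (t.foldl (fun (p : List Int × Int) u =>
        (p.1 ++ [p.2 + PySem.Str.len u], p.2 + PySem.Str.len u)) (acc, s))
      = (acc ++ (List.range t.length).map (fun k => s + pvCumf t (k + 1)),
         s + pvCumf t t.length) := by
  induction t with
  | nil => simp [pvCumf]
  | cons u r ih =>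
      intro acc s
      have h1 : ∀ k : Nat, pvCumf (u :: r) (k + 1) = PySem.Str.len u + pvCumf r k := by
        intro k; simp [pvCumf, List.take_succ_cons]
      simp only [List.foldl_cons, ih, List.length_cons, List.range_succ_eq_map,
        List.map_cons, List.map_map, Prod.mk.injEq]
      refine ⟨?_, by rw [h1]; ring⟩
      simp only [Function.comp, Nat.succ_eq_add_one, h1, List.append_assoc]
      simp [h1]
      exact ⟨by simp [pvCumf], fun a _ => by ring⟩

lemma pv_cumf_min (t : List String) (e : Nat) : pvCumf t (min e t.length) = pvCumf t e := by
  unfold pvCumf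
  rcases le_total e t.length with h | h
  · simp [min_eq_left h]
  · rw [min_eq_right h, List.take_of_length_le h, List.take_of_length_le (le_refl _)]

lemma pv_sum_chunk (t : List String) (a c : Nat) :
    (((t.drop a).take c).map PySem.Str.len).sum = pvCumf t (a + c) - pvCumf t a := by
  unfold pvCumf
  rw [List.take_add, List.map_append, List.sum_append]
  ring


lemma pv_join_len' (l : List String) (h : l ≠ []) :
    PySem.Str.len (PySem.Str.join " " l) = (l.map PySem.Str.len).sum + l.length - 1 := by
  obtain ⟨c, cs, rfl⟩ := List.exists_cons_of_ne_nil h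
  rw [pv_join_len]; simp; push_cast; ring

lemma pv_loopA (t : List String) (mN : Nat) (hm : 0 < mN) (Ktot : Nat)
    (hK : Ktot = (t.length + mN - 1) / mN) : ∀ (K : Nat), K ≤ Ktot →
    (((List.range K).map (fun k : Nat => ((mN : Int) * (k : Int)))).foldl
      (fun (st : List (List String) × List Int) i =>
        let sub_passg := st.1 ++ [PySem.List.slice t (some i) (some (i + (mN : Int)))]
        let char_passg := PySem.List.pyGetD st.2 (-1) 0
          + PySem.Str.len (PySem.Str.join " " (PySem.List.pyGetD sub_passg (-1) []))
        (sub_passg, st.2 ++ [char_passg]))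
      ([], [0]))
    = ((List.range K).map (fun k => pvChunk t mN k),
       (List.range (K + 1)).map (fun j => pvOff t mN j)) := by
  intro K
  induction K with
  | zero => intro _; simp [pvOff, pvCumf]
  | succ K ih =>
      intro hK1
      have hKlt : K * mN < t.length := by
        have h2 : K < Ktot := by omega
        rw [hK, Nat.lt_iff_add_one_le, Nat.le_div_iff_mul_le hm, add_one_mul] at h2
        omega
      have hsplit : ((List.range (K + 1)).map (fun k : Nat => ((mN : Int) * (k : Int))))
          = (List.range K).map (fun k : Nat => ((mN : Int) * (k : Int))) ++ [(mN : Int) * (K : Int)] := by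
        rw [List.range_succ, List.map_append]; rfl
      rw [hsplit, List.foldl_append, ih (by omega)]
      simp only [List.map_cons, List.map_nil, List.foldl_cons, List.foldl_nil]
      -- rewrite the slice at index m*K into pvChunk
      have hcast : (mN : Int) * (K : Int) = ((K * mN : Nat) : Int) := by push_cast; ring
      have hcast2 : ((K * mN : Nat) : Int) + (mN : Int) = ((K * mN + mN : Nat) : Int) := by
        push_cast; ring
      rw [hcast, hcast2, PySem.List.slice_natCast]
      have hchunk : List.take (K * mN + mN - K * mN) (List.drop (K * mN) t) = pvChunk t mN K := by
        simp [pvChunk]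
      rw [hchunk, PySem.List.pyGetD_neg_one_append_singleton]
      -- last offset
      have hoffs : (List.range (K + 1)).map (fun j => pvOff t mN j)
          = (List.range K).map (fun j => pvOff t mN j) ++ [pvOff t mN K] := by
        rw [List.range_succ, List.map_append]; rfl
      rw [hoffs, PySem.List.pyGetD_neg_one_append_singleton]
      -- chunk nonempty
      have hne : pvChunk t mN K ≠ [] := by
        simp [pvChunk, List.take_eq_nil_iff, List.drop_eq_nil_iff]
        omega
      rw [pv_join_len' _ hne]
      simp only [Prod.mk.injEq]
      constructor
      · simp [List.range_succ]
      · rw [List.range_succ (n := K + 1), List.map_append, ← hoffs]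
        congr 1
        simp only [List.map_cons, List.map_nil]
        congr 1
        have hlenN : (pvChunk t mN K).length = min ((K + 1) * mN) t.length - K * mN := by
          simp [pvChunk, add_one_mul]
          omega
        have hle : K * mN ≤ min ((K + 1) * mN) t.length := by
          rw [add_one_mul]; omega
        have hsum : ((pvChunk t mN K).map PySem.Str.len).sum
            = pvCumf t ((K + 1) * mN) - pvCumf t (K * mN) := by
          unfold pvChunk; rw [pv_sum_chunk]; congr 2; ring
        have hminK : min (K * mN) t.length = K * mN := by omega
        have hminKI : min ((K : Int) * (mN : Int)) (t.length : Int) = (K : Int) * (mN : Int) := by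
          have : ((K * mN : Nat) : Int) ≤ ((t.length : Nat) : Int) := by exact_mod_cast le_of_lt hKlt
          push_cast at this
          exact min_eq_left this
        unfold pvOff
        rw [pv_cumf_min, pv_cumf_min, hsum, hlenN, Nat.cast_sub hle]
        push_cast [Nat.cast_min]
        rw [hminKI]
        ring

lemma pv_main (t : List String) (m : Int) (hm : m ≠ 0) :
    (PySem.List.pyRange 0 (PySem.List.len t) m).foldl
      (fun (st : List (List String) × List Int) i =>
        let sub_passg := st.1 ++ [PySem.List.slice t (some i) (some (i + m))]
        let char_passg := PySem.List.pyGetD st.2 (-1) 0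
          + PySem.Str.len (PySem.Str.join " " (PySem.List.pyGetD sub_passg (-1) []))
        (sub_passg, st.2 ++ [char_passg]))
      ([], [0])
    = (if m ≤ 0 then ([], [0]) else
       let n : Int := PySem.List.len t
       let cum := (t.foldl
          (fun (p : List Int × Int) u =>
            (p.1 ++ [p.2 + PySem.Str.len u], p.2 + PySem.Str.len u)) ([0], 0)).1
       let nchunks := PySem.Int.floordiv (n + m - 1) m
       let sub_passg := (PySem.List.pyRange 0 nchunks 1).map
          (fun j => PySem.List.slice t (some (j * m)) (some ((j + 1) * m)))
       let offset_list := 0 :: (PySem.List.pyRange 1 (nchunks + 1) 1).map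
          (fun j => PySem.List.pyGetD cum (min (j * m) n) 0 + min (j * m) n - j)
       (sub_passg, offset_list)) := by
  rcases lt_or_gt_of_ne hm with hneg | hpos
  · rw [if_pos (le_of_lt hneg)]
    have hr : PySem.List.pyRange 0 (PySem.List.len t) m = [] := by
      simp only [PySem.List.pyRange, PySem.List.len]
      have h1 : ¬ (0 : Int) < m := not_lt.mpr (le_of_lt hneg)
      have h2 : ¬ ((t.length : Int) < 0) := not_lt.mpr (Int.natCast_nonneg _)
      simp [hm, h1, h2]
    rw [hr]; rfl
  · rw [if_neg (not_le.mpr hpos)]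
    set mN := m.toNat with hmN
    have hmcast : m = (mN : Int) := by omega
    have hmNpos : 0 < mN := by omega
    set Ktot := (t.length + mN - 1) / mN with hKtot
    -- LHS index list
    have hcount : PySem.List.pyRange 0 (PySem.List.len t) m
        = (List.range Ktot).map (fun k : Nat => ((mN : Int) * (k : Int))) := by
      rw [PySem.List.pyRange_of_pos _ _ hpos]
      rcases Nat.eq_zero_or_pos t.length with h0 | hlpos
      · have : ¬ ((0:Int) < PySem.List.len t) := by simp [PySem.List.len, h0]
        rw [if_neg this]
        have : Ktot = 0 := by rw [hKtot, h0]; exact Nat.div_eq_of_lt (by omega)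
        simp [this]
      · have hlt : (0:Int) < PySem.List.len t := by simp [PySem.List.len]; omega
        rw [if_pos hlt]
        have harg : PySem.List.len t - 0 + m - 1 = ((t.length + mN - 1 : Nat) : Int) := by
          simp [PySem.List.len, hmcast]; push_cast; omega
        rw [harg, hmcast, Int.ofNat_ediv_ofNat, Int.toNat_natCast]
        apply List.map_congr_left
        intro k _
        push_cast [hmcast]
        ring
    rw [hcount, hmcast]
    rw [pv_loopA t mN hmNpos Ktot hKtot Ktot (le_refl _)]
    -- RHS pieces
    have hcum : (t.foldl
          (fun (p : List Int × Int) u =>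
            (p.1 ++ [p.2 + PySem.Str.len u], p.2 + PySem.Str.len u)) ([0], 0)).1
        = (List.range (t.length + 1)).map (fun k => pvCumf t k) := by
      rw [pv_cum_spec, List.range_succ_eq_map]
      simp [pvCumf, List.map_map, Function.comp]
    have hnch : PySem.Int.floordiv (PySem.List.len t + (mN : Int) - 1) (mN : Int) = (Ktot : Int) := by
      have harg : PySem.List.len t + (mN : Int) - 1 = ((t.length + mN - 1 : Nat) : Int) := by
        simp [PySem.List.len]; push_cast; omega
      rw [harg]
      unfold PySem.Int.floordiv
      rw [Int.fdiv_eq_ediv, if_pos (Or.inl (Int.natCast_nonneg mN)), Int.ofNat_ediv_ofNat]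
      ring
    simp only [hcum, hnch, Prod.mk.injEq]
    constructor
    · -- chunks
      rw [PySem.List.pyRange_one]
      simp only [Int.sub_zero, Int.toNat_natCast, List.map_map]
      apply List.map_congr_left
      intro k _
      simp only [Function.comp]
      have c1 : (0 + (k:Int)) * (mN : Int) = ((k * mN : Nat) : Int) := by push_cast; ring
      have c2 : (0 + (k:Int) + 1) * (mN : Int) = ((k * mN + mN : Nat) : Int) := by push_cast; ring
      rw [c1, c2, PySem.List.slice_natCast]
      simp [pvChunk]
    · -- offsets
      rw [PySem.List.pyRange_one]
      rw [show ((Ktot : Int) + 1 - 1) = ((Ktot : Nat) : Int) by ring, Int.toNat_natCast,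
        List.range_succ_eq_map (n := Ktot)]
      simp only [List.map_cons, List.map_map]
      congr 1
      · simp [pvOff, pvCumf]
      · apply List.map_congr_left
        intro k _
        simp only [Function.comp]
        have e1 : (1 + (k : Int)) * (mN : Int) = (((k + 1) * mN : Nat) : Int) := by push_cast; ring
        have e2 : min ((((k + 1) * mN : Nat)) : Int) (PySem.List.len t)
            = ((min ((k + 1) * mN) t.length : Nat) : Int) := by
          simp [PySem.List.len, Nat.cast_min]
        have hee : min ((k + 1) * mN) t.length < t.length + 1 := by omega
        rw [e1, e2, PySem.List.pyGetD_natCast, List.getD_eq_getElem _ _ (by simpa using hee),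
          List.getElem_map, List.getElem_range]
        simp only [pvOff, Nat.succ_eq_add_one]
        push_cast [Nat.cast_min]
        ring

-- ===== VERDICT (by name: the statement is the Claim_ definition above) =====
theorem split_passage_spec : Claim_equal_split_passage := by
  intro passage max_len min_len _ hpre
  unfold Spec_split_passage split_passage split_passage_alt
  exact pv_main _ max_len hpre
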